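-- pv_equiv track=rewrite | github.com/eduardogc8/qa-chave | util/util.py | replace_ponctutation
-- ===== SOURCE A (Python) =====
-- PONCTUATION_REPLACE = [(';', ''), (':', ''), ('(', ''), (')', ''), ('[', ''), (']', ''), ('{', ''), ('}', ''), ('?', ''), ('!', '')]
--
-- NUMBERS = ['0', '1', '2', '3', '4', '5', '6', '7', '8', '9']
--
-- def replace_ponctutation(text):
--     for replace in PONCTUATION_REPLACE:
--         text = text.replace(replace[0], replace[1])
--     if ',' in text or '.' in text:
--         new_text = ''
--         for i in range(len(text)):
--             c = text[i]
--             if c == ',' or c == '.':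
--                 if i > 0 and text[i-1] in NUMBERS and i < len(text)-1 and text[i+1] in NUMBERS:
--                     new_text += c
--             else:
--                 new_text += c
--         text = new_text
--     text = text.strip()
--     return text
-- ===== SOURCE B (Python) =====
-- PUNCT = set(';:()[]{}?!')
-- DIGITS = set('0123456789')
--
--
-- def replace_ponctutation(text):
--     kept = [c for c in text if c not in PUNCT]
--     out = [c for p, c, n in zip(['\0'] + kept, kept, kept[1:] + ['\0'])
--            if c not in ',.' or (p in DIGITS and n in DIGITS)]
--     return ''.join(out).strip()
-- ===== Notes on version B (the rewrite author's own statement) =====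
-- stated objective: idiomatic
-- what changed: Replaces the ten sequential str.replace passes with one filter over the characters, and replaces the index loop with its text[i-1]/text[i+1] neighbour lookups by a single zip of the kept characters with their shifted copies, filtering on the (prev, cur, next) window.
import Mathlib
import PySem

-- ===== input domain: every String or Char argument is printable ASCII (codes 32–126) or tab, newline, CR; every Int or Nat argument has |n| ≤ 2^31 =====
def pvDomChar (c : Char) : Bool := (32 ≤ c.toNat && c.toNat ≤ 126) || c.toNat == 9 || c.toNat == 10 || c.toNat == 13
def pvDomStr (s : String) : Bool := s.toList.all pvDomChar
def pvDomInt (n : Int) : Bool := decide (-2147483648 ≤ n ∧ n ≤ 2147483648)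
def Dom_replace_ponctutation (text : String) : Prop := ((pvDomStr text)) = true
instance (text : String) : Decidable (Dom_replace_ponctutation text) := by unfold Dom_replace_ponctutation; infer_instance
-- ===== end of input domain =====

-- B replaces A's ten sequential str.replace passes and its index loop with neighbour
-- lookups by one character filter followed by one zip-with-shifted-copies window filter
-- (idiomatic, same cost).


-- ===== PORT A =====
def pvPonctuationReplace : List (String × String) :=
  [(";", ""), (":", ""), ("(", ""), (")", ""), ("[", ""), ("]", ""), ("{", ""), ("}", ""), ("?", ""), ("!", "")]

def pvNumbers : List Char := ['0', '1', '2', '3', '4', '5', '6', '7', '8', '9']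

def replace_ponctutation (text : String) : String :=
  let text := pvPonctuationReplace.foldl (fun t r => PySem.Str.replace t r.1 r.2) text
  let text :=
    if PySem.Str.isIn "," text || PySem.Str.isIn "." text then
      let cs := text.toList
      let newText :=
        (PySem.List.pyRange 0 (cs.length : Int)).foldl
          (fun nt i =>
            let c := PySem.List.pyGetD cs i '\x00'
            if c = ',' ∨ c = '.' then
              if 0 < i ∧ PySem.List.pyGetD cs (i - 1) '\x00' ∈ pvNumbers ∧
                  i < (cs.length : Int) - 1 ∧ PySem.List.pyGetD cs (i + 1) '\x00' ∈ pvNumbers then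
                nt ++ [c]
              else nt
            else nt ++ [c]) []
      String.ofList newText
    else text
  PySem.Str.strip text

-- ===== PORT B =====
def pvIsPunct (c : Char) : Bool := List.contains [';', ':', '(', ')', '[', ']', '{', '}', '?', '!'] c

def pvIsDigitCh (c : Char) : Bool := List.contains ['0', '1', '2', '3', '4', '5', '6', '7', '8', '9'] c

def replace_ponctutation_alt (text : String) : String :=
  let kept := text.toList.filter (fun c => !pvIsPunct c)
  let out :=
    ((('\x00' :: kept).zip (kept.zip (kept.drop 1 ++ ['\x00']))).filter
        (fun w => !List.contains [',', '.'] w.2.1 || (pvIsDigitCh w.1 && pvIsDigitCh w.2.2))).map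
      (fun w => w.2.1)
  PySem.Str.strip (String.ofList out)

-- ===== PRECONDITION & SPEC =====
def Spec_replace_ponctutation (text : String) (out : String) : Prop := out = replace_ponctutation_alt text
instance (text : String) (out : String) : Decidable (Spec_replace_ponctutation text out) := by unfold Spec_replace_ponctutation; infer_instance

-- ===== CLAIM (what is proved, stated in full; the proofs are below) =====
def Claim_equal_replace_ponctutation : Prop := ∀ (text : String), Dom_replace_ponctutation text → Spec_replace_ponctutation text (replace_ponctutation text)

-- ===== LEMMAS AND PROOFS =====

-- the common (prev, cur, next)-window semantics both loops compute
def pvKeep (p c n : Char) : Bool :=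
  if c = ',' ∨ c = '.' then pvIsDigitCh p && pvIsDigitCh n else true

def pvWin (p : Char) : List Char → List Char
  | [] => []
  | c :: rest => (if pvKeep p c (rest.headD '\x00') then [c] else []) ++ pvWin c rest

theorem pvKeep_eq_filterCond (p c n : Char) :
    (!List.contains [',', '.'] c || (pvIsDigitCh p && pvIsDigitCh n)) = pvKeep p c n := by
  by_cases h1 : c = ',' <;> by_cases h2 : c = '.' <;>
    simp [pvKeep, List.contains_eq_mem, h1, h2]

theorem pvWin_eq_self (p : Char) (t : List Char)
    (h : ∀ c ∈ t, ¬(c = ',' ∨ c = '.')) : pvWin p t = t := by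
  induction t generalizing p with
  | nil => rfl
  | cons c rest ih =>
    simp only [pvWin, pvKeep, if_neg (h c (by simp))]
    simp [ih c (fun x hx => h x (by simp [hx]))]

-- B's zip-filter-map is pvWin
theorem pvZip_eq_win (t : List Char) (p : Char) :
    (((p :: t).zip (t.zip (t.drop 1 ++ ['\x00']))).filter
        (fun w => !List.contains [',', '.'] w.2.1 || (pvIsDigitCh w.1 && pvIsDigitCh w.2.2))).map
      (fun w => w.2.1) = pvWin p t := by
  induction t generalizing p with
  | nil => rfl
  | cons c rest ih =>
    cases rest with
    | nil =>
      simp only [List.drop, List.nil_append, List.zip_cons_cons, List.zip_nil_right,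
        List.filter_cons, pvKeep_eq_filterCond, pvWin, List.headD]
      by_cases hk : pvKeep p c '\x00' = true <;> simp [hk]
    | cons d rs =>
      have htail := ih (p := c)
      simp only [List.drop_succ_cons, List.drop_zero] at htail ⊢
      simp only [List.zip_cons_cons, List.cons_append, List.filter_cons,
        pvKeep_eq_filterCond, pvWin, List.headD] at htail ⊢
      by_cases hk : pvKeep p c d = true <;> simp [hk, htail]

theorem pvMemNumbers (x : Char) : x ∈ pvNumbers ↔ pvIsDigitCh x = true := by
  simp [pvNumbers, pvIsDigitCh, List.contains_eq_mem]

theorem pvGetD_last (l : List Char) (d : Char) (h : l ≠ []) :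
    l.getD (l.length - 1) d = l.getLastD d := by
  induction l with
  | nil => simp at h
  | cons a t ih =>
    cases t with
    | nil => simp
    | cons b r => simpa using ih (by simp)

theorem pvFold_eq_win (cs : List Char) :
    ∀ (suf pre acc : List Char), cs = pre ++ suf →
      (PySem.List.pyRange (pre.length : Int) (cs.length : Int)).foldl
          (fun nt i =>
            let c := PySem.List.pyGetD cs i '\x00'
            if c = ',' ∨ c = '.' then
              if 0 < i ∧ PySem.List.pyGetD cs (i - 1) '\x00' ∈ pvNumbers ∧
                  i < (cs.length : Int) - 1 ∧ PySem.List.pyGetD cs (i + 1) '\x00' ∈ pvNumbers then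
                nt ++ [c]
              else nt
            else nt ++ [c]) acc
        = acc ++ pvWin (pre.getLastD '\x00') suf := by
  intro suf
  induction suf with
  | nil =>
    intro pre acc h
    have : cs.length = pre.length := by simp [h]
    rw [this]
    simp [PySem.List.pyRange, pvWin]
  | cons c rest ih =>
    intro pre acc h
    have hlencs : cs.length = pre.length + rest.length + 1 := by simp [h]; omega
    have hlt : (pre.length : Int) < (cs.length : Int) := by
      rw [hlencs]; omega
    rw [PySem.List.pyRange_one_cons hlt, List.foldl_cons]
    have hcast : ((pre ++ [c]).length : Int) = (pre.length : Int) + 1 := by simp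
    have hrec := ih (pre ++ [c])
      ((fun nt i =>
            let c := PySem.List.pyGetD cs i '\x00'
            if c = ',' ∨ c = '.' then
              if 0 < i ∧ PySem.List.pyGetD cs (i - 1) '\x00' ∈ pvNumbers ∧
                  i < (cs.length : Int) - 1 ∧ PySem.List.pyGetD cs (i + 1) '\x00' ∈ pvNumbers then
                nt ++ [c]
              else nt
            else nt ++ [c]) acc (pre.length : Int))
      (by simpa using h)
    rw [hcast] at hrec
    rw [hrec, List.getLastD_concat]
    have hc : PySem.List.pyGetD cs ((pre.length : Nat) : Int) '\x00' = c := by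
      rw [h, PySem.List.pyGetD_natCast, List.getD_append_right _ _ _ _ le_rfl]
      simp
    have hG : (0 < ((pre.length : Nat) : Int) ∧
          PySem.List.pyGetD cs (((pre.length : Nat) : Int) - 1) '\x00' ∈ pvNumbers ∧
          ((pre.length : Nat) : Int) < (cs.length : Int) - 1 ∧
          PySem.List.pyGetD cs (((pre.length : Nat) : Int) + 1) '\x00' ∈ pvNumbers)
        ↔ (pvIsDigitCh (pre.getLastD '\x00') && pvIsDigitCh (rest.headD '\x00')) = true := by
      cases pre with
      | nil =>
        constructor
        · rintro ⟨h0, -⟩; simp at h0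
        · intro hx
          rw [show List.getLastD ([] : List Char) '\x00' = '\x00' from rfl,
            show pvIsDigitCh '\x00' = false from rfl] at hx
          simp at hx
      | cons q qs =>
        cases rest with
        | nil =>
          constructor
          · rintro ⟨-, -, h3, -⟩
            rw [hlencs] at h3; push_cast [List.length_cons, List.length_append, List.length_nil] at h3; omega
          · intro hx
            rw [show List.headD ([] : List Char) '\x00' = '\x00' from rfl,
              show pvIsDigitCh '\x00' = false from rfl] at hx
            simp at hx
        | cons d rs =>
          have h1 : (0 : Int) < (((q :: qs).length : Nat) : Int) := by
            exact_mod_cast Nat.succ_pos qs.length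
          have h3 : ((((q :: qs).length : Nat)) : Int) < (cs.length : Int) - 1 := by
            rw [hlencs]; push_cast [List.length_cons, List.length_append, List.length_nil]; omega
          have hprev : PySem.List.pyGetD cs ((((q :: qs).length : Nat) : Int) - 1) '\x00'
              = (q :: qs).getLastD '\x00' := by
            have hc1 : ((((q :: qs).length : Nat) : Int) - 1) = (((q :: qs).length - 1 : Nat) : Int) := by
              simp
            rw [hc1, PySem.List.pyGetD_natCast, h,
              List.getD_append _ _ _ _ (by simp)]
            exact pvGetD_last _ _ (by simp)
          have hnext : PySem.List.pyGetD cs ((((q :: qs).length : Nat) : Int) + 1) '\x00'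
              = (d :: rs).headD '\x00' := by
            have hc1 : ((((q :: qs).length : Nat) : Int) + 1) = ((((q :: qs).length + 1) : Nat) : Int) := by
              push_cast; ring
            rw [hc1, PySem.List.pyGetD_natCast, h,
              List.getD_append_right _ _ _ _ (by simp)]
            simp
          rw [hprev, hnext]
          simp only [Bool.and_eq_true]
          constructor
          · rintro ⟨-, hp, -, hn⟩
            exact ⟨(pvMemNumbers _).mp hp, (pvMemNumbers _).mp hn⟩
          · rintro ⟨hp, hn⟩
            exact ⟨h1, (pvMemNumbers _).mpr hp, h3, (pvMemNumbers _).mpr hn⟩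
    simp only [hc]
    rw [show pvWin (pre.getLastD '\x00') (c :: rest)
        = (if pvKeep (pre.getLastD '\x00') c (rest.headD '\x00') then [c] else []) ++ pvWin c rest from rfl]
    by_cases hcm : c = ',' ∨ c = '.'
    · rw [if_pos hcm, show pvKeep (pre.getLastD '\x00') c (rest.headD '\x00')
          = (pvIsDigitCh (pre.getLastD '\x00') && pvIsDigitCh (rest.headD '\x00')) from by
            rw [pvKeep, if_pos hcm]]
      by_cases hd : (pvIsDigitCh (pre.getLastD '\x00') && pvIsDigitCh (rest.headD '\x00')) = true
      · rw [if_pos (hG.mpr hd), if_pos hd]; simp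
      · rw [if_neg (fun hGt => hd (hG.mp hGt)), if_neg hd]; simp
    · rw [if_neg hcm, show pvKeep (pre.getLastD '\x00') c (rest.headD '\x00') = true from by
        rw [pvKeep, if_neg hcm]]
      simp

theorem pvGo_single (x : Char) : ∀ (fuel : Nat) (l acc : List Char), l.length ≤ fuel →
    PySem.Chars.replace.go [x] [] fuel l acc = acc.reverse ++ l.filter (fun c => !(c == x)) := by
  intro fuel
  induction fuel with
  | zero =>
    intro l acc h
    have : l = [] := List.eq_nil_of_length_eq_zero (Nat.le_zero.mp h)
    subst this
    simp [PySem.Chars.replace.go]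
  | succ n ih =>
    intro l acc h
    cases l with
    | nil => simp [PySem.Chars.replace.go]
    | cons c t =>
      rw [PySem.Chars.replace.go]
      by_cases hx : x = c
      · subst hx
        simp only [List.isPrefixOf, beq_self_eq_true, Bool.true_and, if_pos]
        simp [ih t acc (by simpa using Nat.le_of_succ_le_succ h)]
      · have : ([x].isPrefixOf (c :: t)) = false := by
          simp [List.isPrefixOf, hx]
        rw [this]
        simp only [Bool.false_eq_true, if_false]
        rw [ih t (c :: acc) (by simpa using Nat.le_of_succ_le_succ h)]
        simp [Ne.symm hx]

theorem pvReplace_single (x : Char) (l : List Char) :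
    PySem.Chars.replace l [x] [] = l.filter (fun c => !(c == x)) := by
  rw [PySem.Chars.replace]
  simp [pvGo_single x l.length l [] le_rfl]

theorem pvFold_replace (text : String) :
    (pvPonctuationReplace.foldl (fun t r => PySem.Str.replace t r.1 r.2) text).toList
      = text.toList.filter (fun c => !pvIsPunct c) := by
  simp only [pvPonctuationReplace, List.foldl_cons, List.foldl_nil, PySem.Str.toList_replace]
  rw [show (";" : String).toList = [';'] from rfl, show (":" : String).toList = [':'] from rfl,
    show ("(" : String).toList = ['('] from rfl, show (")" : String).toList = [')'] from rfl,
    show ("[" : String).toList = ['['] from rfl, show ("]" : String).toList = [']'] from rfl,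
    show ("{" : String).toList = ['{'] from rfl, show ("}" : String).toList = ['}'] from rfl,
    show ("?" : String).toList = ['?'] from rfl, show ("!" : String).toList = ['!'] from rfl,
    show ("" : String).toList = [] from rfl]
  simp only [pvReplace_single, List.filter_filter]
  refine List.filter_congr ?_
  intro c _
  simp only [pvIsPunct, List.contains_cons, List.contains_nil, Bool.or_false, Bool.not_or]
  ac_rfl


theorem pvNotMem_of_isIn_false (t : String) (x : Char) (hx : (String.ofList [x]).toList = [x])
    (h : PySem.Str.isIn (String.ofList [x]) t = false) : x ∉ t.toList := by
  intro hmem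
  rw [Bool.eq_false_iff] at h
  exact h ((PySem.Str.isIn_iff_infix _ _).mpr (by rw [hx]; exact (List.singleton_infix_iff x t.toList).mpr hmem))

theorem replace_ponctutation_spec' (text : String) :
    replace_ponctutation text = replace_ponctutation_alt text := by
  unfold replace_ponctutation replace_ponctutation_alt
  simp only []
  set t1 := pvPonctuationReplace.foldl (fun t r => PySem.Str.replace t r.1 r.2) text with ht1
  have hK : t1.toList = text.toList.filter (fun c => !pvIsPunct c) := pvFold_replace text
  rw [pvZip_eq_win]
  by_cases hg : (PySem.Str.isIn "," t1 || PySem.Str.isIn "." t1) = true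
  · rw [if_pos hg]
    have hfold := pvFold_eq_win t1.toList t1.toList [] [] (by simp)
    simp only [List.length_nil, Nat.cast_zero, List.nil_append, List.getLastD_nil] at hfold
    rw [hfold, hK]
  · rw [if_neg hg]
    simp only [Bool.or_eq_true, not_or, Bool.not_eq_true] at hg
    have hcomma : ',' ∉ t1.toList :=
      pvNotMem_of_isIn_false t1 ',' rfl (by simpa using hg.1)
    have hdot : '.' ∉ t1.toList :=
      pvNotMem_of_isIn_false t1 '.' rfl (by simpa using hg.2)
    rw [← hK, pvWin_eq_self _ _ (by
      intro c hc
      rintro (rfl | rfl)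
      · exact hcomma hc
      · exact hdot hc)]
    rw [String.ofList_toList]

-- ===== VERDICT (by name: the statement is the Claim_ definition above) =====
theorem replace_ponctutation_spec : Claim_equal_replace_ponctutation := by
  intro text _
  exact replace_ponctutation_spec' text
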